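-- pv_equiv track=rewrite | github.com/raeez/chiral-bar-cobar | compute/lib/theorem_coha_bar_duality_engine.py | euler_form_ade
-- ===== SOURCE A (Python) =====
-- from typing import Dict, List, Optional, Tuple, Union
--
-- def euler_form_ade(dynkin_type: str, rank: int,
--                    d1: List[int], d2: List[int]) -> int:
--     r"""Euler form <d1, d2> for ADE Dynkin quiver.
--
--     <d1, d2> = sum_i d1_i d2_i - sum_{(i->j)} d1_i d2_j
--
--     For ADE types the Euler form is related to the Cartan matrix:
--         <e_i, e_j> = C_{ij}  (Cartan matrix entry)
--     where C = 2I - A (I = identity, A = adjacency of the underlying graph).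
--     """
--     n = rank
--     adj = [[0] * n for _ in range(n)]
--     if dynkin_type == "A":
--         for i in range(n - 1):
--             adj[i][i + 1] = 1
--     elif dynkin_type == "D":
--         for i in range(n - 2):
--             adj[i][i + 1] = 1
--         if n >= 3:
--             adj[n - 3][n - 1] = 1
--     elif dynkin_type == "E":
--         for i in range(n - 2):
--             adj[i][i + 1] = 1
--         adj[2][n - 1] = 1
--
--     result = sum(d1[i] * d2[i] for i in range(n))
--     for i in range(n):
--         for j in range(n):
--             result -= adj[i][j] * d1[i] * d2[j]
--     return result
-- ===== SOURCE B (Python) =====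
-- from typing import List
--
-- def euler_form_ade(dynkin_type: str, rank: int,
--                    d1: List[int], d2: List[int]) -> int:
--     """Euler form <d1, d2> for ADE Dynkin quiver, in one fused O(n) pass.
--
--     The quiver's arrows are a chain i -> i+1 (of length depending on the
--     type) plus at most one extra arrow, so a single loop can add the
--     diagonal term d1[i]*d2[i] and subtract the chain term d1[i]*d2[i+1]
--     together; the one extra arrow is handled after the loop.
--     """
--     n = rank
--     if dynkin_type == "A":
--         m = n - 1
--     elif dynkin_type == "D" or dynkin_type == "E":
--         m = n - 2
--     else:
--         m = 0
--     result = 0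
--     for i in range(n):
--         result += d1[i] * d2[i]
--         if i < m:
--             result -= d1[i] * d2[i + 1]
--     if dynkin_type == "D" and n >= 3:
--         result -= d1[n - 3] * d2[n - 1]
--     elif dynkin_type == "E":
--         result -= d1[2] * d2[n - 1]
--     return result
-- ===== Notes on version B (the rewrite author's own statement) =====
-- stated objective: faster
-- what changed: B does one fused O(n) pass that adds the diagonal term and subtracts the chain-arrow term in the same loop (plus one post-loop special arrow), instead of materialising the dense n x n adjacency matrix and scanning all n^2 entries.
import Mathlib
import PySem

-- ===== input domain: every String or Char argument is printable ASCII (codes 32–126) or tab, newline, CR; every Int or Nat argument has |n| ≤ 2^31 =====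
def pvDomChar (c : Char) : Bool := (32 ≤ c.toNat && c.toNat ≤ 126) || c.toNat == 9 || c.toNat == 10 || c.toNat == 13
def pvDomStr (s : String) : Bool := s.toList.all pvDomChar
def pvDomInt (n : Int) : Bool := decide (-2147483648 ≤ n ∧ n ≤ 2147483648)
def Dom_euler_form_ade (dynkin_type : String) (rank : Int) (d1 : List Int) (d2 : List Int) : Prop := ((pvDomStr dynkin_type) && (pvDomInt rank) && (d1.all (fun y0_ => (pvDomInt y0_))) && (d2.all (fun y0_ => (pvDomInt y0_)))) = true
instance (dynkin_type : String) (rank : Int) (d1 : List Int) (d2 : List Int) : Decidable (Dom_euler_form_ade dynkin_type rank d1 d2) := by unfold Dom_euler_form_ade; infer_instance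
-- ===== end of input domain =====

-- B replaces A's dense n×n adjacency matrix and full n² scan by one fused O(n) pass that adds the
-- diagonal term and subtracts the chain-arrow term in the same loop, plus at most one post-loop
-- special arrow (objective: faster, asymptotic O(n²) → O(n)).

-- ===== PORT A =====
-- adj[i][j] = 1  (Python list-element assignment on the nested list)
def pvSetMat (adj : List (List Int)) (i j : Int) : List (List Int) :=
  PySem.List.pySetD adj i (PySem.List.pySetD (PySem.List.pyGetD adj i []) j 1)

def euler_form_ade (dynkin_type : String) (rank : Int) (d1 : List Int) (d2 : List Int) : Int :=
  let n := rank
  let adj : List (List Int) := List.replicate n.toNat (List.replicate n.toNat 0)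
  let adj : List (List Int) :=
    if dynkin_type = "A" then
      (PySem.List.pyRange 0 (n - 1) 1).foldl (fun adj i => pvSetMat adj i (i + 1)) adj
    else if dynkin_type = "D" then
      let adj := (PySem.List.pyRange 0 (n - 2) 1).foldl (fun adj i => pvSetMat adj i (i + 1)) adj
      if 3 ≤ n then pvSetMat adj (n - 3) (n - 1) else adj
    else if dynkin_type = "E" then
      let adj := (PySem.List.pyRange 0 (n - 2) 1).foldl (fun adj i => pvSetMat adj i (i + 1)) adj
      pvSetMat adj 2 (n - 1)
    else adj
  let result := ((PySem.List.pyRange 0 n 1).map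
      (fun i => PySem.List.pyGetD d1 i 0 * PySem.List.pyGetD d2 i 0)).sum
  (PySem.List.pyRange 0 n 1).foldl (fun result i =>
    (PySem.List.pyRange 0 n 1).foldl (fun result j =>
      result - PySem.List.pyGetD (PySem.List.pyGetD adj i []) j 0 *
        PySem.List.pyGetD d1 i 0 * PySem.List.pyGetD d2 j 0) result) result

-- ===== PORT B =====
def euler_form_ade_alt (dynkin_type : String) (rank : Int) (d1 : List Int) (d2 : List Int) : Int :=
  let n := rank
  let m : Int :=
    if dynkin_type = "A" then n - 1
    else if dynkin_type = "D" ∨ dynkin_type = "E" then n - 2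
    else 0
  let result : Int :=
    (PySem.List.pyRange 0 n 1).foldl (fun result i =>
      let result := result + PySem.List.pyGetD d1 i 0 * PySem.List.pyGetD d2 i 0
      if i < m then result - PySem.List.pyGetD d1 i 0 * PySem.List.pyGetD d2 (i + 1) 0
      else result) 0
  if dynkin_type = "D" ∧ 3 ≤ n then
    result - PySem.List.pyGetD d1 (n - 3) 0 * PySem.List.pyGetD d2 (n - 1) 0
  else if dynkin_type = "E" then
    result - PySem.List.pyGetD d1 2 0 * PySem.List.pyGetD d2 (n - 1) 0
  else result

-- ===== PRECONDITION & SPEC =====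
-- Pre_: exactly where Python A returns (else IndexError: d1[i]/d2[i] need rank ≤ len, and
-- type "E" unconditionally writes adj[2][n-1], which needs rank ≥ 3).
def Pre_euler_form_ade (dynkin_type : String) (rank : Int) (d1 : List Int) (d2 : List Int) : Prop :=
  rank ≤ (d1.length : Int) ∧ rank ≤ (d2.length : Int) ∧ (dynkin_type = "E" → 3 ≤ rank)
instance (dynkin_type : String) (rank : Int) (d1 : List Int) (d2 : List Int) : Decidable (Pre_euler_form_ade dynkin_type rank d1 d2) := by unfold Pre_euler_form_ade; infer_instance

def pvWitness_euler_form_ade : String × Int × List Int × List Int := ("D", 4, [1, 2, 0, 1], [0, 1, 1, 2])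

def Spec_euler_form_ade (dynkin_type : String) (rank : Int) (d1 : List Int) (d2 : List Int) (out : Int) : Prop := out = euler_form_ade_alt dynkin_type rank d1 d2
instance (dynkin_type : String) (rank : Int) (d1 : List Int) (d2 : List Int) (out : Int) : Decidable (Spec_euler_form_ade dynkin_type rank d1 d2 out) := by unfold Spec_euler_form_ade; infer_instance

-- ===== CLAIM (what is proved, stated in full; the proofs are below) =====
def Claim_equal_euler_form_ade : Prop := ∀ (dynkin_type : String) (rank : Int) (d1 : List Int) (d2 : List Int), Dom_euler_form_ade dynkin_type rank d1 d2 → Pre_euler_form_ade dynkin_type rank d1 d2 → Spec_euler_form_ade dynkin_type rank d1 d2 (euler_form_ade dynkin_type rank d1 d2)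

-- ===== LEMMAS AND PROOFS =====

theorem euler_form_ade_witness :
    Dom_euler_form_ade pvWitness_euler_form_ade.1 pvWitness_euler_form_ade.2.1
      pvWitness_euler_form_ade.2.2.1 pvWitness_euler_form_ade.2.2.2 ∧
    Pre_euler_form_ade pvWitness_euler_form_ade.1 pvWitness_euler_form_ade.2.1
      pvWitness_euler_form_ade.2.2.1 pvWitness_euler_form_ade.2.2.2 := by decide

-- proof-only intermediate form: the quiver as an explicit edge list, folded once
def pvEdgeForm (dynkin_type : String) (rank : Int) (d1 : List Int) (d2 : List Int) : Int :=
  let n := rank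
  let edges : List (Int × Int) :=
    if dynkin_type = "A" then
      (PySem.List.pyRange 0 (n - 1) 1).map (fun i => (i, i + 1))
    else if dynkin_type = "D" then
      let e := (PySem.List.pyRange 0 (n - 2) 1).map (fun i => (i, i + 1))
      if 3 ≤ n then e ++ [(n - 3, n - 1)] else e
    else if dynkin_type = "E" then
      let e := (PySem.List.pyRange 0 (n - 2) 1).map (fun i => (i, i + 1))
      if 3 ≤ n then e ++ [(2, n - 1)] else e
    else []
  let result := ((PySem.List.pyRange 0 n 1).map
      (fun i => PySem.List.pyGetD d1 i 0 * PySem.List.pyGetD d2 i 0)).sum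
  edges.foldl (fun result e =>
    result - PySem.List.pyGetD d1 e.1 0 * PySem.List.pyGetD d2 e.2 0) result

-- a loop 'for x in L: r -= f x' is r₀ minus the sum
theorem pv_foldl_sub {α : Type} (f : α → Int) :
    ∀ (L : List α) (r : Int), L.foldl (fun r x => r - f x) r = r - (L.map f).sum := by
  intro L
  induction L with
  | nil => simp
  | cons x xs ih => intro r; simp [List.foldl, ih]; ring

theorem pv_sum_range (f : Nat → Int) (n : Nat) :
    ((List.range n).map f).sum = ∑ i ∈ Finset.range n, f i := rfl

-- sum of f over pyRange 0 t 1 as a Finset sum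
theorem pv_range_sum (t : Int) (f : Int → Int) :
    ((PySem.List.pyRange 0 t 1).map f).sum = ∑ i ∈ Finset.range t.toNat, f (i : Int) := by
  rw [PySem.List.pyRange_one 0 t]
  simp only [Int.sub_zero, List.map_map, Function.comp_def, zero_add]
  exact pv_sum_range _ _

-- matrix entry adj[i][j] at Nat indices
def pvEntry (M : List (List Int)) (i j : Nat) : Int := (M.getD i []).getD j 0

-- the adjacency-building loop of A, at Nat indices
def pvB (es : List (Nat × Nat)) (M : List (List Int)) : List (List Int) :=
  es.foldl (fun M e => M.set e.1 ((M.getD e.1 []).set e.2 1)) M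

theorem pvEntry_set (M : List (List Int)) (p q i j : Nat)
    (hp : p < M.length) (hq : q < (M.getD p []).length) :
    pvEntry (M.set p ((M.getD p []).set q 1)) i j =
      if i = p ∧ j = q then 1 else pvEntry M i j := by
  unfold pvEntry
  simp only [List.getD] at hq
  by_cases hip : i = p
  · subst hip
    have hrow : (M.set i ((M.getD i []).set q 1)).getD i [] = (M.getD i []).set q 1 := by
      simp [List.getD, hp]
    rw [hrow]
    by_cases hjq : j = q
    · subst hjq; simp [List.getD, hq]
    · simp [List.getD, Ne.symm hjq, hjq]
  · have hrow : (M.set p ((M.getD p []).set q 1)).getD i [] = M.getD i [] := by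
      simp [List.getD, Ne.symm hip]
    rw [hrow]
    simp [hip]

theorem pvEntry_pvB (N : Nat) (es : List (Nat × Nat)) :
    ∀ (M : List (List Int)), M.length = N → (∀ r ∈ M, r.length = N) →
    (∀ e ∈ es, e.1 < N ∧ e.2 < N) → ∀ i j,
    pvEntry (pvB es M) i j = if (i, j) ∈ es then 1 else pvEntry M i j := by
  induction es with
  | nil => intro M _ _ _ i j; simp [pvB]
  | cons e es ih =>
    intro M hlen hr hb i j
    have he := hb e (by simp)
    have hp : e.1 < M.length := by omega
    have hgd : M.getD e.1 [] = M[e.1] := List.getD_eq_getElem M [] hp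
    have hrowlen : (M.getD e.1 []).length = N := by
      rw [hgd]; exact hr _ (List.getElem_mem hp)
    have hstep := pvEntry_set M e.1 e.2 i j hp (by omega)
    have hM1len : (M.set e.1 ((M.getD e.1 []).set e.2 1)).length = N := by simp [hlen]
    have hM1rows : ∀ r ∈ M.set e.1 ((M.getD e.1 []).set e.2 1), r.length = N := by
      intro r hrm
      rcases List.mem_or_eq_of_mem_set hrm with h | h
      · exact hr r h
      · subst h; simp only [List.length_set]; simpa [List.getD] using hrowlen
    have hrest := ih (M.set e.1 ((M.getD e.1 []).set e.2 1)) hM1len hM1rows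
      (fun x hx => hb x (by simp [hx])) i j
    show pvEntry (pvB es _) i j = _
    rw [hrest, hstep]
    by_cases hmem : (i, j) ∈ es
    · simp [hmem]
    · by_cases hij : i = e.1 ∧ j = e.2
      · have heq : (i, j) = e := by rcases hij with ⟨h1, h2⟩; cases e; simp_all
        simp [hij, heq.symm ▸ hmem]
      · have hne : (i, j) ≠ e := by cases e; simp_all [Prod.ext_iff]
        simp [hmem, hij, hne]

theorem pvEntry_zero (N i j : Nat) :
    pvEntry (List.replicate N (List.replicate N (0:Int))) i j = 0 := by
  unfold pvEntry
  by_cases hi : i < N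
  · simp [List.getD, hi]
  · simp [List.getD, hi]

theorem pv_sum_entries (N : Nat) (a b : Nat → Int) :
    ∀ (es : List (Nat × Nat)), (∀ e ∈ es, e.1 < N ∧ e.2 < N) → es.Nodup →
    ∑ i ∈ Finset.range N, ∑ j ∈ Finset.range N,
      (if (i, j) ∈ es then (1:Int) else 0) * a i * b j
    = (es.map (fun e => a e.1 * b e.2)).sum := by
  intro es
  induction es with
  | nil => intro _ _; simp
  | cons e es ih =>
    intro hb hnd
    have he := hb e (by simp)
    have henotmem : e ∉ es := (List.nodup_cons.mp hnd).1
    have hsplit : ∀ i j : Nat,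
        (if (i, j) ∈ e :: es then (1:Int) else 0) * a i * b j
        = (if (i, j) ∈ es then (1:Int) else 0) * a i * b j
          + (if i = e.1 then a i else 0) * (if j = e.2 then b j else 0) := by
      intro i j
      by_cases hij : (i, j) = e
      · have h1 : i = e.1 := by cases e; simp_all
        have h2 : j = e.2 := by cases e; simp_all
        simp [henotmem, h1, h2]
      · have h12 : ¬(i = e.1 ∧ j = e.2) := by cases e; simp_all [Prod.ext_iff]
        by_cases hmem : (i, j) ∈ es
        · have hm : (i, j) ∈ e :: es := by simp [hmem]
          rcases Decidable.not_and_iff_not_or_not.mp h12 with h | h <;> simp [hm, hmem, h]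
        · have hm : (i, j) ∉ e :: es := by simp [hmem, hij]
          rcases Decidable.not_and_iff_not_or_not.mp h12 with h | h <;> simp [hm, hmem, h]
    calc ∑ i ∈ Finset.range N, ∑ j ∈ Finset.range N,
          (if (i, j) ∈ e :: es then (1:Int) else 0) * a i * b j
        = (∑ i ∈ Finset.range N, ∑ j ∈ Finset.range N,
            (if (i, j) ∈ es then (1:Int) else 0) * a i * b j)
          + ∑ i ∈ Finset.range N, ∑ j ∈ Finset.range N,
            (if i = e.1 then a i else 0) * (if j = e.2 then b j else 0) := by
          simp only [hsplit, Finset.sum_add_distrib]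
      _ = (es.map (fun e => a e.1 * b e.2)).sum + a e.1 * b e.2 := by
          rw [ih (fun x hx => hb x (List.mem_cons_of_mem e hx)) (List.Nodup.of_cons hnd)]
          congr 1
          rw [← Finset.sum_mul_sum]
          rw [Finset.sum_ite_eq' (Finset.range N) e.1 a, Finset.sum_ite_eq' (Finset.range N) e.2 b]
          simp [he.1, he.2]
      _ = ((e :: es).map (fun e => a e.1 * b e.2)).sum := by simp; ring

theorem pv_entry_val (N : Nat) (esN : List (Nat × Nat))
    (hb : ∀ e ∈ esN, e.1 < N ∧ e.2 < N) (i j : Nat) :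
    ((pvB esN (List.replicate N (List.replicate N (0:Int)))).getD i []).getD j 0
      = if (i, j) ∈ esN then 1 else 0 := by
  have h := pvEntry_pvB N esN (List.replicate N (List.replicate N 0))
    (by simp) (by intro r hr; rw [List.eq_of_mem_replicate hr]; simp) hb i j
  rw [pvEntry_zero] at h
  simpa [pvEntry] using h

-- the glue: A's dense double loop over the built matrix = one loop over the edges
theorem pv_glue (n : Int) (esN : List (Nat × Nat)) (d1 d2 : List Int) (r0 : Int)
    (hb : ∀ e ∈ esN, (e.1 : Int) < n ∧ (e.2 : Int) < n) (hnd : esN.Nodup) :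
    (PySem.List.pyRange 0 n 1).foldl (fun r i =>
      (PySem.List.pyRange 0 n 1).foldl (fun r j =>
        r - PySem.List.pyGetD (PySem.List.pyGetD
            ((esN.map (fun e => ((e.1 : Int), (e.2 : Int)))).foldl
              (fun M e => pvSetMat M e.1 e.2)
              (List.replicate n.toNat (List.replicate n.toNat 0))) i []) j 0 *
          PySem.List.pyGetD d1 i 0 * PySem.List.pyGetD d2 j 0) r) r0
    = (esN.map (fun e => ((e.1 : Int), (e.2 : Int)))).foldl
        (fun r e => r - PySem.List.pyGetD d1 e.1 0 * PySem.List.pyGetD d2 e.2 0) r0 := by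
  have hbN : ∀ e ∈ esN, e.1 < n.toNat ∧ e.2 < n.toNat := by
    intro e he
    have := hb e he
    omega
  have hADJ : (esN.map (fun e => ((e.1 : Int), (e.2 : Int)))).foldl
      (fun M e => pvSetMat M e.1 e.2)
      (List.replicate n.toNat (List.replicate n.toNat 0))
      = pvB esN (List.replicate n.toNat (List.replicate n.toNat 0)) := by
    rw [List.foldl_map]
    simp only [pvB, pvSetMat, PySem.List.pySetD_natCast, PySem.List.pyGetD_natCast]
  rw [hADJ]
  simp only [pv_foldl_sub]
  congr 1
  rw [PySem.List.pyRange_one 0 n]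
  simp only [Int.sub_zero, List.map_map, Function.comp_def, zero_add,
    PySem.List.pyGetD_natCast, pv_sum_range,
    pv_entry_val n.toNat esN hbN]
  rw [pv_sum_entries n.toNat _ _ esN hbN hnd]

-- the chain edges (i, i+1), i < m, at Nat indices, cast back to the Int pairs the ports use
theorem pv_chain_cast (m : Int) :
    ((List.range m.toNat).map (fun k => ((k : Nat), k + 1))).map
        (fun e => ((e.1 : Int), (e.2 : Int)))
      = (PySem.List.pyRange 0 m 1).map (fun i => (i, i + 1)) := by
  rw [PySem.List.pyRange_one 0 m]
  simp only [List.map_map, Function.comp_def, Int.sub_zero, zero_add]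
  refine List.map_congr_left ?_
  intro k _
  push_cast
  ring_nf

theorem pv_chain_nodup (m : Nat) :
    ((List.range m).map (fun k => (k, k + 1))).Nodup := by
  refine (List.nodup_range).map ?_
  intro a b h
  simpa using h

theorem pv_chain_foldl (m : Int) (Z : List (List Int)) :
    ((PySem.List.pyRange 0 m 1).map (fun i => (i, i + 1))).foldl
        (fun M e => pvSetMat M e.1 e.2) Z
      = (PySem.List.pyRange 0 m 1).foldl (fun adj i => pvSetMat adj i (i + 1)) Z := by
  rw [List.foldl_map]

theorem pv_chain_mem (m k1 k2 : Nat) :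
    (k1, k2) ∈ (List.range m).map (fun k => ((k : Nat), k + 1)) ↔ k1 < m ∧ k2 = k1 + 1 := by
  simp [List.mem_map]
  omega

-- A equals the edge-list form, on Pre_
theorem pv_A_eq_edge (dt : String) (n : Int) (d1 d2 : List Int)
    (hpre : Pre_euler_form_ade dt n d1 d2) :
    euler_form_ade dt n d1 d2 = pvEdgeForm dt n d1 d2 := by
  obtain ⟨h1, h2, hE⟩ := hpre
  unfold euler_form_ade pvEdgeForm
  by_cases hA : dt = "A"
  · simp only [hA, reduceIte]
    rw [← pv_chain_foldl (n - 1), ← pv_chain_cast (n - 1)]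
    refine pv_glue n _ d1 d2 _ ?_ (pv_chain_nodup _)
    intro e he
    rcases List.mem_map.mp he with ⟨k, hk, rfl⟩
    simp only [List.mem_range] at hk
    constructor <;> · simp; omega
  · simp only [hA, reduceIte]
    by_cases hD : dt = "D"
    · simp only [hD, reduceIte]
      by_cases h3 : 3 ≤ n
      · simp only [if_pos h3]
        have hcast : (((List.range (n - 2).toNat).map (fun k => ((k : Nat), k + 1))
              ++ [((n - 3).toNat, (n - 1).toNat)]).map
                (fun e => ((e.1 : Int), (e.2 : Int))))
            = (PySem.List.pyRange 0 (n - 2) 1).map (fun i => (i, i + 1))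
              ++ [(n - 3, n - 1)] := by
          rw [List.map_append, pv_chain_cast]
          simp only [List.map_cons, List.map_nil,
            Int.toNat_of_nonneg (show (0:Int) ≤ n - 3 by omega),
            Int.toNat_of_nonneg (show (0:Int) ≤ n - 1 by omega)]
        have hadj : (((List.range (n - 2).toNat).map (fun k => ((k : Nat), k + 1))
              ++ [((n - 3).toNat, (n - 1).toNat)]).map
                (fun e => ((e.1 : Int), (e.2 : Int)))).foldl
              (fun M e => pvSetMat M e.1 e.2)
              (List.replicate n.toNat (List.replicate n.toNat 0))
            = pvSetMat ((PySem.List.pyRange 0 (n - 2) 1).foldl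
                (fun adj i => pvSetMat adj i (i + 1))
                (List.replicate n.toNat (List.replicate n.toNat 0))) (n - 3) (n - 1) := by
          rw [hcast, List.foldl_append, pv_chain_foldl]
          simp only [List.foldl_cons, List.foldl_nil]
        rw [← hadj, ← hcast]
        refine pv_glue n _ d1 d2 _ ?_ ?_
        · intro e he
          rcases List.mem_append.mp he with h | h
          · rw [pv_chain_mem] at h
            omega
          · simp only [List.mem_singleton] at h
            subst h
            refine ⟨?_, ?_⟩ <;> · dsimp only; omega
        · refine List.Nodup.append (pv_chain_nodup _) (List.nodup_singleton _) ?_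
          intro a ha hb
          simp only [List.mem_singleton] at hb
          subst hb
          rw [pv_chain_mem] at ha
          omega
      · simp only [if_neg h3]
        rw [← pv_chain_foldl (n - 2), ← pv_chain_cast (n - 2)]
        refine pv_glue n _ d1 d2 _ ?_ (pv_chain_nodup _)
        intro e he
        rcases List.mem_map.mp he with ⟨k, hk, rfl⟩
        simp only [List.mem_range] at hk
        constructor <;> · simp; omega
    · simp only [hD, reduceIte]
      by_cases hEq : dt = "E"
      · have h3 : 3 ≤ n := hE hEq
        simp only [hEq, reduceIte, if_pos h3]
        have hcast : (((List.range (n - 2).toNat).map (fun k => ((k : Nat), k + 1))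
              ++ [((2 : Nat), (n - 1).toNat)]).map
                (fun e => ((e.1 : Int), (e.2 : Int))))
            = (PySem.List.pyRange 0 (n - 2) 1).map (fun i => (i, i + 1))
              ++ [(2, n - 1)] := by
          rw [List.map_append, pv_chain_cast]
          simp only [List.map_cons, List.map_nil, Nat.cast_ofNat,
            Int.toNat_of_nonneg (show (0:Int) ≤ n - 1 by omega)]
        have hadj : (((List.range (n - 2).toNat).map (fun k => ((k : Nat), k + 1))
              ++ [((2 : Nat), (n - 1).toNat)]).map
                (fun e => ((e.1 : Int), (e.2 : Int)))).foldl
              (fun M e => pvSetMat M e.1 e.2)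
              (List.replicate n.toNat (List.replicate n.toNat 0))
            = pvSetMat ((PySem.List.pyRange 0 (n - 2) 1).foldl
                (fun adj i => pvSetMat adj i (i + 1))
                (List.replicate n.toNat (List.replicate n.toNat 0))) 2 (n - 1) := by
          rw [hcast, List.foldl_append, pv_chain_foldl]
          simp only [List.foldl_cons, List.foldl_nil]
        rw [← hadj, ← hcast]
        refine pv_glue n _ d1 d2 _ ?_ ?_
        · intro e he
          rcases List.mem_append.mp he with h | h
          · rw [pv_chain_mem] at h
            omega
          · simp only [List.mem_singleton] at h
            subst h
            refine ⟨?_, ?_⟩ <;> · dsimp only; omega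
        · refine List.Nodup.append (pv_chain_nodup _) (List.nodup_singleton _) ?_
          intro a ha hb
          simp only [List.mem_singleton] at hb
          subst hb
          rw [pv_chain_mem] at ha
          omega
      · simp only [hEq, reduceIte]
        simpa using pv_glue n [] d1 d2
          (((PySem.List.pyRange 0 n 1).map
            (fun i => PySem.List.pyGetD d1 i 0 * PySem.List.pyGetD d2 i 0)).sum)
          (by simp) (by simp)

-- B's fused loop, over List.range (lambda in the zeta-reduced if-shape), as its closed form
theorem pv_fold_fused (G H : Int → Int) (m : Int) :
    ∀ (N : Nat) (r0 : Int),
    List.foldl (fun r i => if i < m then r + G i - H i else r + G i) r0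
        ((List.range N).map (fun k : Nat => (k : Int)))
    = r0 + ∑ i ∈ Finset.range N, (G (i : Int) - if (i : Int) < m then H (i : Int) else 0) := by
  intro N
  induction N with
  | zero => simp
  | succ k ih =>
    intro r0
    rw [List.range_succ, List.map_append, List.foldl_append, ih, Finset.sum_range_succ]
    simp only [List.map_cons, List.map_nil, List.foldl_cons, List.foldl_nil]
    split_ifs with h <;> ring

-- a guarded partial sum over range N collapses to range m.toNat when m.toNat ≤ N
theorem pv_if_sum (m : Int) (H : Int → Int) (N : Nat) (hmn : m.toNat ≤ N) :
    ∑ i ∈ Finset.range N, (if (i : Int) < m then H (i : Int) else 0)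
      = ∑ i ∈ Finset.range m.toNat, H (i : Int) := by
  have hsub : Finset.range m.toNat ⊆ Finset.range N := by
    intro x hx
    simp only [Finset.mem_range] at hx ⊢
    omega
  have h1 : ∑ i ∈ Finset.range m.toNat, (if (i : Int) < m then H (i : Int) else 0)
      = ∑ i ∈ Finset.range N, (if (i : Int) < m then H (i : Int) else 0) := by
    refine Finset.sum_subset hsub ?_
    intro i _ hi
    have hi' : ¬ i < m.toNat := fun h => hi (Finset.mem_range.mpr h)
    have hlt : ¬ (i : Int) < m := by omega
    simp [hlt]
  rw [← h1]
  refine Finset.sum_congr rfl ?_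
  intro i hi
  have hi' : i < m.toNat := Finset.mem_range.mp hi
  have hlt : (i : Int) < m := by omega
  simp [hlt]

-- B's fused pass equals the diagonal sum minus the chain sum
theorem pv_alt_closed (n m : Int) (d1 d2 : List Int) (hmn : m.toNat ≤ n.toNat) :
    (PySem.List.pyRange 0 n 1).foldl (fun r i =>
        if i < m then
          r + PySem.List.pyGetD d1 i 0 * PySem.List.pyGetD d2 i 0
            - PySem.List.pyGetD d1 i 0 * PySem.List.pyGetD d2 (i + 1) 0
        else r + PySem.List.pyGetD d1 i 0 * PySem.List.pyGetD d2 i 0) 0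
    = ((PySem.List.pyRange 0 n 1).map
        (fun i => PySem.List.pyGetD d1 i 0 * PySem.List.pyGetD d2 i 0)).sum
      - ∑ i ∈ Finset.range m.toNat,
          PySem.List.pyGetD d1 (i : Int) 0 * PySem.List.pyGetD d2 ((i : Int) + 1) 0 := by
  rw [pv_range_sum]
  rw [PySem.List.pyRange_one 0 n]
  simp only [Int.sub_zero, zero_add]
  rw [pv_fold_fused (fun i => PySem.List.pyGetD d1 i 0 * PySem.List.pyGetD d2 i 0)
    (fun i => PySem.List.pyGetD d1 i 0 * PySem.List.pyGetD d2 (i + 1) 0) m n.toNat 0]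
  rw [Finset.sum_sub_distrib, pv_if_sum m (fun i => PySem.List.pyGetD d1 i 0 * PySem.List.pyGetD d2 (i + 1) 0) n.toNat hmn]
  ring

-- the edge-list fold equals the diagonal sum minus the chain sum (chain-only edge lists)
theorem pv_edge_chain_sum (m : Int) (d1 d2 : List Int) (r0 : Int) :
    ((PySem.List.pyRange 0 m 1).map (fun i => (i, i + 1))).foldl
        (fun r (e : Int × Int) =>
          r - PySem.List.pyGetD d1 e.1 0 * PySem.List.pyGetD d2 e.2 0) r0
      = r0 - ∑ i ∈ Finset.range m.toNat,
          PySem.List.pyGetD d1 (i : Int) 0 * PySem.List.pyGetD d2 ((i : Int) + 1) 0 := by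
  rw [pv_foldl_sub, List.map_map]
  congr 1
  exact pv_range_sum m _

-- B equals the edge-list form, given the "E" rank condition of Pre_
theorem pv_B_eq_edge (dt : String) (n : Int) (d1 d2 : List Int)
    (hE : dt = "E" → 3 ≤ n) :
    euler_form_ade_alt dt n d1 d2 = pvEdgeForm dt n d1 d2 := by
  unfold euler_form_ade_alt pvEdgeForm
  by_cases hA : dt = "A"
  · simp only [hA, reduceIte, String.reduceEq, false_or, false_and, if_false]
    rw [pv_alt_closed n (n - 1) d1 d2 (by omega), pv_edge_chain_sum]
  · by_cases hD : dt = "D"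
    · simp only [hA, hD, reduceIte, String.reduceEq, true_or]
      by_cases h3 : 3 ≤ n
      · simp only [if_pos h3, if_pos (And.intro rfl h3) ]
        rw [pv_alt_closed n (n - 2) d1 d2 (by omega), List.foldl_append, pv_edge_chain_sum]
        simp only [List.foldl_cons, List.foldl_nil]
        simp [h3]
      · have : ¬ ((("D" : String) = "D") ∧ 3 ≤ n) := by simp [h3]
        simp only [if_neg h3, if_neg this, String.reduceEq, if_false]
        rw [pv_alt_closed n (n - 2) d1 d2 (by omega), pv_edge_chain_sum]
        simp [h3]
    · by_cases hEq : dt = "E"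
      · have h3 : 3 ≤ n := hE hEq
        have hne : ¬ ((("E" : String) = "D") ∧ 3 ≤ n) := by simp
        simp only [hA, hD, hEq, reduceIte, String.reduceEq, or_true, if_pos h3, if_neg hne]
        rw [pv_alt_closed n (n - 2) d1 d2 (by omega), List.foldl_append, pv_edge_chain_sum]
        simp only [List.foldl_cons, List.foldl_nil]
        simp
      · have hor : ¬ (dt = "D" ∨ dt = "E") := by simp [hD, hEq]
        have hand : ¬ (dt = "D" ∧ 3 ≤ n) := fun h => hD h.1
        simp only [hA, hD, hEq, hor, hand, reduceIte, false_and, false_or, or_self, if_false, List.foldl_nil]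
        rw [pv_alt_closed n 0 d1 d2 (by omega)]
        simp

-- ===== VERDICT (by name: the statement is the Claim_ definition above) =====
theorem euler_form_ade_spec : Claim_equal_euler_form_ade := by
  intro dt n d1 d2 _ hpre
  unfold Spec_euler_form_ade
  rw [pv_A_eq_edge dt n d1 d2 hpre, pv_B_eq_edge dt n d1 d2 hpre.2.2]
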